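-- pv_equiv track=rewrite | github.com/kuznetsovvj/education | algorithms/codeforces/1509a.py | check
-- ===== SOURCE A (Python) =====
-- def check(seq):
--     a, b = [], []
--     for i in seq:
--         if i % 2 == 0:
--             a.append(i)
--         else:
--             b.append(i)
--     return " ".join(map(str, a + b))
-- ===== SOURCE B (Python) =====
-- def check(seq):
--     return " ".join(map(str, sorted(seq, key=lambda i: i % 2)))
-- ===== Notes on version B (the rewrite author's own statement) =====
-- stated objective: simpler
-- what changed: Replaces the explicit two-accumulator partition loop with a single stable sort on the parity key i % 2 (evens before odds, original relative order preserved by stability).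
import Mathlib
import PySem

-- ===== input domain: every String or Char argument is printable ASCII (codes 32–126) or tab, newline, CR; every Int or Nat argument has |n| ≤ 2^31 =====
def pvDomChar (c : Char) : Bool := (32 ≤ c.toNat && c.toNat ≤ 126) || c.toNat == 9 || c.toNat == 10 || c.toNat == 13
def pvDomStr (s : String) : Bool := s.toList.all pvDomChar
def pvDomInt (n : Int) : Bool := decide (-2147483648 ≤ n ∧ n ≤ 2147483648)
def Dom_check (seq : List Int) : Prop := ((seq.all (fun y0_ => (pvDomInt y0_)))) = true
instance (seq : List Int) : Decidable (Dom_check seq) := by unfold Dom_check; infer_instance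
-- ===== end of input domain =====

-- B replaces A's two-accumulator partition loop by one stable sort on the parity key; same output, no speed claim.

-- ===== PORT A =====
-- the loop appending i to a (evens) or b (odds), then " ".join(map(str, a + b))
def check (seq : List Int) : String :=
  let ab := seq.foldl
    (fun (ab : List Int × List Int) i =>
      if PySem.Int.mod i 2 = 0 then (ab.1 ++ [i], ab.2) else (ab.1, ab.2 ++ [i]))
    ([], [])
  PySem.Str.join " " ((ab.1 ++ ab.2).map PySem.Int.toStr)

-- ===== PORT B =====
-- " ".join(map(str, sorted(seq, key=lambda i: i % 2)))
def check_alt (seq : List Int) : String :=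
  PySem.Str.join " " ((PySem.List.sorted seq (fun i => PySem.Int.mod i 2)).map PySem.Int.toStr)

-- ===== PRECONDITION & SPEC =====
def Spec_check (seq : List Int) (out : String) : Prop := out = check_alt seq
instance (seq : List Int) (out : String) : Decidable (Spec_check seq out) := by unfold Spec_check; infer_instance

-- ===== CLAIM (what is proved, stated in full; the proofs are below) =====
def Claim_equal_check : Prop := ∀ (seq : List Int), Dom_check seq → Spec_check seq (check seq)

-- ===== LEMMAS AND PROOFS =====

-- inserting an even element into evens ++ odds lands at the end of the evens
theorem pv_insertBy_even (x : Int) (hx : PySem.Int.mod x 2 = 0)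
    (ev od : List Int)
    (hev : ∀ y ∈ ev, PySem.Int.mod y 2 = 0)
    (hod : ∀ y ∈ od, PySem.Int.mod y 2 = 1) :
    PySem.List.insertBy
        (fun a b => decide (PySem.Int.mod a 2 < PySem.Int.mod b 2)) x (ev ++ od)
      = (ev ++ [x]) ++ od := by
  induction ev with
  | nil =>
    cases od with
    | nil => simp [PySem.List.insertBy]
    | cons y ys =>
      have hy : PySem.Int.mod y 2 = 1 := hod y (by simp)
      simp only [List.nil_append, PySem.List.insertBy]
      rw [if_pos (by rw [hx, hy]; decide)]
      simp
  | cons e es ih =>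
    have he : PySem.Int.mod e 2 = 0 := hev e (by simp)
    have ih' := ih (fun y hy => hev y (by simp [hy]))
    simp only [List.cons_append, PySem.List.insertBy]
    rw [if_neg (by rw [hx, he]; decide)]
    rw [ih']

-- inserting an odd element goes to the very end
theorem pv_insertBy_odd (x : Int) (hx : PySem.Int.mod x 2 = 1) (ys : List Int) :
    PySem.List.insertBy
        (fun a b => decide (PySem.Int.mod a 2 < PySem.Int.mod b 2)) x ys
      = ys ++ [x] := by
  apply PySem.List.insertBy_of_forall_not_before
  intro y _
  simp only [decide_eq_false_iff_not, not_lt, hx]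
  rcases PySem.Int.mod_two_eq y with h | h <;> rw [h] <;> decide

-- the insertion-sort fold keeps the accumulator partitioned: evens then odds
theorem pv_fold_insert (seq : List Int) (ev od : List Int)
    (hev : ∀ y ∈ ev, PySem.Int.mod y 2 = 0)
    (hod : ∀ y ∈ od, PySem.Int.mod y 2 = 1) :
    seq.foldl
        (fun acc x =>
          PySem.List.insertBy
            (fun a b => decide (PySem.Int.mod a 2 < PySem.Int.mod b 2)) x acc)
        (ev ++ od)
      = (ev ++ seq.filter (fun i => decide (PySem.Int.mod i 2 = 0)))
        ++ (od ++ seq.filter (fun i => !decide (PySem.Int.mod i 2 = 0))) := by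
  induction seq generalizing ev od with
  | nil => simp
  | cons x xs ih =>
    rcases PySem.Int.mod_two_eq x with hx | hx
    · have hev' : ∀ y ∈ ev ++ [x], PySem.Int.mod y 2 = 0 := by
        intro y hy
        rcases List.mem_append.1 hy with h | h
        · exact hev y h
        · simp at h; simpa [h] using hx
      have ih' := ih (ev ++ [x]) od hev' hod
      simp only [List.foldl_cons]
      rw [pv_insertBy_even x hx ev od hev hod, ih',
          List.filter_cons, List.filter_cons,
          if_pos (by rw [hx]; decide), if_neg (by rw [hx]; decide)]
      simp
    · have hod' : ∀ y ∈ od ++ [x], PySem.Int.mod y 2 = 1 := by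
        intro y hy
        rcases List.mem_append.1 hy with h | h
        · exact hod y h
        · simp at h; simpa [h] using hx
      have ih' := ih ev (od ++ [x]) hev hod'
      simp only [List.foldl_cons]
      rw [pv_insertBy_odd x hx (ev ++ od), List.append_assoc,
          ih',
          List.filter_cons, List.filter_cons,
          if_neg (by rw [hx]; decide), if_pos (by rw [hx]; decide)]
      simp
-- A's partition loop computes (filter even, filter odd)
theorem pv_partition (seq : List Int) (a b : List Int) :
    seq.foldl
        (fun (ab : List Int × List Int) i =>
          if PySem.Int.mod i 2 = 0 then (ab.1 ++ [i], ab.2) else (ab.1, ab.2 ++ [i]))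
        (a, b)
      = (a ++ seq.filter (fun i => decide (PySem.Int.mod i 2 = 0)),
         b ++ seq.filter (fun i => !decide (PySem.Int.mod i 2 = 0))) := by
  induction seq generalizing a b with
  | nil => simp
  | cons x xs ih =>
    simp only [List.foldl_cons]
    by_cases hx : PySem.Int.mod x 2 = 0
    · rw [if_pos hx, ih (a ++ [x]) b,
          List.filter_cons, List.filter_cons,
          if_pos (by rw [hx]; decide), if_neg (by rw [hx]; decide)]
      simp
    · have hx1 : PySem.Int.mod x 2 = 1 := by
        rcases PySem.Int.mod_two_eq x with h | h
        · exact absurd h hx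
        · exact h
      rw [if_neg hx, ih a (b ++ [x]),
          List.filter_cons, List.filter_cons,
          if_neg (by rw [hx1]; decide), if_pos (by rw [hx1]; decide)]
      simp

-- ===== VERDICT (by name: the statement is the Claim_ definition above) =====
theorem check_spec : Claim_equal_check := by
  intro seq _
  show check seq = check_alt seq
  have h1 := pv_partition seq [] []
  have h2 := pv_fold_insert seq [] [] (by simp) (by simp)
  simp only [List.nil_append] at h1 h2
  simp only [check, check_alt, PySem.List.sorted_eq_foldl_insertBy, h1, h2]
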